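-- pv_equiv track=rewrite | github.com/julianalverio/helix_optimization | twistr/pipeline/examples/assembly.py | expand_with_context
-- ===== SOURCE A (Python) =====
-- def expand_with_context(
--     interface_positions: set[int],
--     real_positions: list[int],
--     context: int,
-- ) -> tuple[set[int], set[int]]:
--     """Expand interface_positions by ±context in tensor (real-residue) position.
--     Returns (all_positions, interface_positions_only). `real_positions` is the sorted
--     list of valid tensor positions for this chain; context expansion is clamped to it."""
--     if not interface_positions:
--         return set(), set()
--     real_index = {p: i for i, p in enumerate(real_positions)}
--     expanded: set[int] = set()
--     for pos in interface_positions: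
--         if pos not in real_index:
--             continue
--         idx = real_index[pos]
--         lo = max(0, idx - context)
--         hi = min(len(real_positions) - 1, idx + context)
--         for k in range(lo, hi + 1):
--             expanded.add(real_positions[k])
--     return expanded, set(interface_positions) & expanded
-- ===== SOURCE B (Python) =====
-- def expand_with_context(
--     interface_positions: set[int],
--     real_positions: list[int],
--     context: int,
-- ) -> tuple[set[int], set[int]]:
--     """Interval-coverage rewrite: keep a sorted disjoint list of covered index
--     intervals; each window contributes only its uncovered gaps, so every real
--     position is emitted at most once instead of being re-added per window."""
--     if not interface_positions:
--         return set(), set()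
--     index_of = {p: i for i, p in enumerate(real_positions)}
--     n = len(real_positions)
--     out = []   # expanded positions, in first-coverage order
--     cov = []   # sorted disjoint covered index intervals (lo, hi)
--     for pos in interface_positions:
--         if pos not in index_of:
--             continue
--         idx = index_of[pos]
--         lo = max(0, idx - context)
--         hi = min(n - 1, idx + context)
--         if lo > hi:
--             continue
--         left, mid, right = [], [], []
--         for iv in cov:
--             if iv[1] < lo:
--                 left.append(iv)
--             elif hi < iv[0]:
--                 right.append(iv)
--             else:
--                 mid.append(iv)
--         k = lo
--         for a, b in mid:
--             if k < a:
--                 out.extend(real_positions[k:a])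
--             k = b + 1
--         if k <= hi:
--             out.extend(real_positions[k:hi + 1])
--         new_lo = min(lo, mid[0][0]) if mid else lo
--         new_hi = max(hi, mid[-1][1]) if mid else hi
--         cov = left + [(new_lo, new_hi)] + right
--     expanded = set(out)
--     return expanded, interface_positions & expanded
-- ===== Notes on version B (the rewrite author's own statement) =====
-- stated objective: alternative
-- what changed: A dedups by value, re-adding every index of every +-context window into a hash set; B maintains a sorted disjoint list of covered index intervals and emits only the uncovered gap slices of each window, so each real position is produced exactly once and overlapping windows cost interval arithmetic instead of re-scans.
import Mathlib
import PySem

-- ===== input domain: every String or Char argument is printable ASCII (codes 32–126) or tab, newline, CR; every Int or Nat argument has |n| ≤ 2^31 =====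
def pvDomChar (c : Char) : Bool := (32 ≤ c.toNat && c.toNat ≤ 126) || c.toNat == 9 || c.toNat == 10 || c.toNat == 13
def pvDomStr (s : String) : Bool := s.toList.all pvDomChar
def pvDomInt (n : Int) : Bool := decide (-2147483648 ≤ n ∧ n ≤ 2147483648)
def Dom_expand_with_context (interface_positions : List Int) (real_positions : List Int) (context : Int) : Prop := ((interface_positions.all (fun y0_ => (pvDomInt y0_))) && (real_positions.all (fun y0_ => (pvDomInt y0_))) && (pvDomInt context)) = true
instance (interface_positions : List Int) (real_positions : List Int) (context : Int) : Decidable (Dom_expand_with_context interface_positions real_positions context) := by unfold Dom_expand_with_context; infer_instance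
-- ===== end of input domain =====

-- B replaces A's per-element hash-set dedup of every window index by a sorted disjoint list of
-- covered index intervals: each window contributes only its uncovered gap slices, so each real
-- position is emitted once (objective: alternative algorithm; both outputs are Python sets).

-- ===== PORT A =====
-- {p: i for i, p in enumerate(real_positions)}
def pvRealIndex (real_positions : List Int) : PySem.Dict Int Int :=
  (PySem.List.enumerate real_positions).foldl (fun d ip => d.insert ip.2 ip.1) PySem.Dict.empty

def expand_with_context (interface_positions : List Int) (real_positions : List Int) (context : Int) : List Int × List Int :=
  if interface_positions = [] then ([], [])
  else
    let real_index := pvRealIndex real_positions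
    let expanded : PySem.Set Int := interface_positions.foldl (fun ex pos =>
      match real_index.get? pos with
      | none => ex          -- continue
      | some idx =>
        let lo := max 0 (idx - context)
        let hi := min ((real_positions.length : Int) - 1) (idx + context)
        (PySem.List.pyRange lo (hi + 1)).foldl
          (fun ex k => PySem.Set.add ex (PySem.List.pyGetD real_positions k 0)) ex)
      PySem.Set.empty
    (expanded, PySem.Set.inter (PySem.Set.ofList interface_positions) expanded)

-- ===== PORT B =====
-- the 'for iv in cov' loop splitting cov into (left, mid, right)
def pvSplit (cov : List (Int × Int)) (lo hi : Int) :
    List (Int × Int) × List (Int × Int) × List (Int × Int) :=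
  cov.foldl (fun lmr iv =>
    if iv.2 < lo then (lmr.1 ++ [iv], lmr.2.1, lmr.2.2)
    else if hi < iv.1 then (lmr.1, lmr.2.1, lmr.2.2 ++ [iv])
    else (lmr.1, lmr.2.1 ++ [iv], lmr.2.2)) ([], [], [])

-- the 'k = lo; for a, b in mid: …' gap-emission loop followed by the tail slice
def pvEmit (real_positions : List Int) (mid : List (Int × Int)) (lo hi : Int) (out : List Int) : List Int :=
  let s := mid.foldl (fun (s : Int × List Int) ab =>
      (ab.2 + 1, if s.1 < ab.1 then s.2 ++ PySem.List.slice real_positions (some s.1) (some ab.1) else s.2))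
    (lo, out)
  if s.1 ≤ hi then s.2 ++ PySem.List.slice real_positions (some s.1) (some (hi + 1)) else s.2

def expand_with_context_alt (interface_positions : List Int) (real_positions : List Int) (context : Int) : List Int × List Int :=
  if interface_positions = [] then ([], [])
  else
    let index_of := pvRealIndex real_positions
    let n : Int := real_positions.length
    let st := interface_positions.foldl (fun (s : List Int × List (Int × Int)) pos =>
      match index_of.get? pos with
      | none => s          -- continue
      | some idx =>
        let lo := max 0 (idx - context)
        let hi := min (n - 1) (idx + context)
        if lo > hi then s  -- continue
        else
          let lmr := pvSplit s.2 lo hi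
          let out := pvEmit real_positions lmr.2.1 lo hi s.1
          let new_lo := match lmr.2.1.head? with | none => lo | some ab => min lo ab.1
          let new_hi := match lmr.2.1.getLast? with | none => hi | some ab => max hi ab.2
          (out, lmr.1 ++ [(new_lo, new_hi)] ++ lmr.2.2))
      ([], [])
    let expanded := PySem.Set.ofList st.1
    (expanded, PySem.Set.inter (PySem.Set.ofList interface_positions) expanded)

-- ===== PRECONDITION & SPEC =====
def Spec_expand_with_context (interface_positions : List Int) (real_positions : List Int) (context : Int) (out : List Int × List Int) : Prop := out = expand_with_context_alt interface_positions real_positions context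
instance (interface_positions : List Int) (real_positions : List Int) (context : Int) (out : List Int × List Int) : Decidable (Spec_expand_with_context interface_positions real_positions context out) := by unfold Spec_expand_with_context; infer_instance

-- ===== CLAIM (what is proved, stated in full; the proofs are below) =====
def Claim_equal_expand_with_context : Prop := ∀ (interface_positions : List Int) (real_positions : List Int) (context : Int), Dom_expand_with_context interface_positions real_positions context → Spec_expand_with_context interface_positions real_positions context (expand_with_context interface_positions real_positions context)

-- ===== LEMMAS AND PROOFS =====

-- k is covered by one of the intervals
abbrev pvCov (cov : List (Int × Int)) (k : Int) : Prop := ∃ iv ∈ cov, iv.1 ≤ k ∧ k ≤ iv.2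

-- the loop invariant on cov: in-range intervals, sorted and disjoint
def pvGood (n : Int) (cov : List (Int × Int)) : Prop :=
  (∀ iv ∈ cov, 0 ≤ iv.1 ∧ iv.1 ≤ iv.2 ∧ iv.2 < n) ∧ cov.Pairwise (fun p q => p.2 < q.1)

theorem pv_pairwise_cases {α : Type} {r : α → α → Prop} :
    ∀ {l : List α}, l.Pairwise r → ∀ {a b : α}, a ∈ l → b ∈ l → a = b ∨ r a b ∨ r b a := by
  intro l
  induction l with
  | nil => intro _ a b ha; simp at ha
  | cons x t ih =>
    intro hl a b ha hb
    rw [List.pairwise_cons] at hl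
    cases List.mem_cons.mp ha with
    | inl h1 =>
      cases List.mem_cons.mp hb with
      | inl h2 => subst h1; subst h2; exact Or.inl rfl
      | inr h2 => subst h1; exact Or.inr (Or.inl (hl.1 b h2))
    | inr h1 =>
      cases List.mem_cons.mp hb with
      | inl h2 => subst h2; exact Or.inr (Or.inr (hl.1 a h1))
      | inr h2 => exact ih hl.2 h1 h2

theorem pvSplit_go (lo hi : Int) : ∀ (cov : List (Int × Int)) (l m r : List (Int × Int)),
    cov.foldl (fun lmr iv =>
      if iv.2 < lo then (lmr.1 ++ [iv], lmr.2.1, lmr.2.2)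
      else if hi < iv.1 then (lmr.1, lmr.2.1, lmr.2.2 ++ [iv])
      else (lmr.1, lmr.2.1 ++ [iv], lmr.2.2)) (l, m, r)
    = (l ++ cov.filter (fun iv => decide (iv.2 < lo)),
       m ++ cov.filter (fun iv => !decide (iv.2 < lo) && !decide (hi < iv.1)),
       r ++ cov.filter (fun iv => !decide (iv.2 < lo) && decide (hi < iv.1))) := by
  intro cov
  induction cov with
  | nil => intro l m r; simp
  | cons iv t ih =>
    intro l m r
    simp only [List.foldl_cons, List.filter_cons]
    by_cases h1 : iv.2 < lo
    · simpa [h1, List.append_assoc] using ih (l ++ [iv]) m r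
    · by_cases h2 : hi < iv.1
      · simpa [h1, h2, List.append_assoc] using ih l m (r ++ [iv])
      · simpa [h1, h2, List.append_assoc] using ih l (m ++ [iv]) r

theorem pvSplit_eq (lo hi : Int) (cov : List (Int × Int)) :
    pvSplit cov lo hi =
      (cov.filter (fun iv => decide (iv.2 < lo)),
       cov.filter (fun iv => !decide (iv.2 < lo) && !decide (hi < iv.1)),
       cov.filter (fun iv => !decide (iv.2 < lo) && decide (hi < iv.1))) := by
  simpa using pvSplit_go lo hi cov [] [] []

-- the indexed window read element by element is the clamped slice (reused crux of the slice view)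
theorem pv_range_map_eq_slice (rps : List Int) (lo stop : Int) (h0 : 0 ≤ lo)
    (hs : stop ≤ (rps.length : Int)) :
    (PySem.List.pyRange lo stop).map (fun k => PySem.List.pyGetD rps k 0)
      = PySem.List.slice rps (some lo) (some (max 0 stop)) := by
  rw [PySem.List.slice_toNat rps h0 (by omega)]
  by_cases hlt : lo < stop
  · have hlen : lo.toNat < rps.length := by omega
    rw [PySem.List.pyRange_one_cons hlt, List.map_cons,
        PySem.List.pyGetD_eq_getElem rps 0 h0 (by omega),
        List.drop_eq_getElem_cons hlen]
    have hrec := pv_range_map_eq_slice rps (lo + 1) stop (by omega) hs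
    rw [PySem.List.slice_toNat rps (by omega) (by omega)] at hrec
    rw [hrec]
    have h1 : (lo + 1).toNat = lo.toNat + 1 := by omega
    have h2 : (max 0 stop).toNat - lo.toNat = ((max 0 stop).toNat - (lo.toNat + 1)) + 1 := by omega
    rw [h1, h2, List.take_succ_cons]
  · rw [PySem.List.pyRange_one_eq_nil (by omega)]
    have : (max 0 stop).toNat - lo.toNat = 0 := by omega
    rw [this]
    simp
termination_by (stop - lo).toNat
decreasing_by omega

-- proof-side twin of pvEmit with the running pointer k explicit
def pvEmitK (real_positions : List Int) (mid : List (Int × Int)) (k hi : Int) (out : List Int) : List Int :=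
  let s := mid.foldl (fun (s : Int × List Int) ab =>
      (ab.2 + 1, if s.1 < ab.1 then s.2 ++ PySem.List.slice real_positions (some s.1) (some ab.1) else s.2))
    (k, out)
  if s.1 ≤ hi then s.2 ++ PySem.List.slice real_positions (some s.1) (some (hi + 1)) else s.2

theorem pvEmit_eq_pvEmitK (rps : List Int) (mid : List (Int × Int)) (lo hi : Int) (out : List Int) :
    pvEmit rps mid lo hi out = pvEmitK rps mid lo hi out := rfl

-- the gap loop emits exactly the uncovered part of [k, hi], in order
theorem pvEmitK_eq (rps : List Int) (hi : Int) (hhi : hi < (rps.length : Int)) :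
    ∀ (mid : List (Int × Int)) (k : Int) (out : List Int),
      0 ≤ k → k ≤ hi + 1 →
      (∀ iv ∈ mid, 0 ≤ iv.1 ∧ iv.1 ≤ iv.2 ∧ iv.1 ≤ hi ∧ k ≤ iv.2 + 1) →
      mid.Pairwise (fun p q => p.2 < q.1) →
      pvEmitK rps mid k hi out
        = out ++ ((PySem.List.pyRange k (hi + 1)).filter (fun j => !decide (pvCov mid j))).map
            (fun j => PySem.List.pyGetD rps j 0) := by
  intro mid
  induction mid with
  | nil =>
    intro k out hk0 hk1 _ _
    simp only [pvEmitK, List.foldl_nil]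
    by_cases hk : k ≤ hi
    · rw [if_pos hk]
      have hs := pv_range_map_eq_slice rps k (hi + 1) hk0 (by omega)
      have hmax : max 0 (hi + 1) = hi + 1 := by omega
      rw [hmax] at hs
      rw [← hs]
      congr 1
      rw [List.filter_eq_self.mpr]
      intro j _
      simp [pvCov]
    · rw [if_neg hk]
      rw [PySem.List.pyRange_one_eq_nil (by omega)]
      simp
  | cons ab t ih =>
    intro k out hk0 hk1 hov hpw
    rw [List.pairwise_cons] at hpw
    obtain ⟨h0a, habb, hahi, hkb⟩ := hov ab List.mem_cons_self
    have hstep : pvEmitK rps (ab :: t) k hi out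
        = pvEmitK rps t (ab.2 + 1) hi
            (if k < ab.1 then out ++ PySem.List.slice rps (some k) (some ab.1) else out) := by
      simp only [pvEmitK, List.foldl_cons]
    have hout2 : (if k < ab.1 then out ++ PySem.List.slice rps (some k) (some ab.1) else out)
        = out ++ (PySem.List.pyRange k (max k ab.1)).map (fun j => PySem.List.pyGetD rps j 0) := by
      by_cases hka : k < ab.1
      · have hs := pv_range_map_eq_slice rps k ab.1 hk0 (by omega)
        have hmax0 : max 0 ab.1 = ab.1 := by omega
        have hmaxk : max k ab.1 = ab.1 := by omega
        rw [if_pos hka, hmaxk, hs, hmax0]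
      · have hmk : max k ab.1 = k := by omega
        rw [if_neg hka, hmk, PySem.List.pyRange_one_eq_nil le_rfl]
        simp
    have hf1 : ∀ j ∈ PySem.List.pyRange k (max k ab.1), (!decide (pvCov (ab :: t) j)) = true := by
      intro j hj
      rw [PySem.List.mem_pyRange_one] at hj
      simp only [Bool.not_eq_true', decide_eq_false_iff_not]
      rintro ⟨iv, hiv, hc1, hc2⟩
      rcases List.mem_cons.mp hiv with rfl | hiv
      · omega
      · have := hpw.1 iv hiv
        omega
    by_cases hb : ab.2 ≤ hi
    · -- interval inside the window: recurse past it
      have hovt : ∀ iv ∈ t, 0 ≤ iv.1 ∧ iv.1 ≤ iv.2 ∧ iv.1 ≤ hi ∧ ab.2 + 1 ≤ iv.2 + 1 := by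
        intro iv hiv
        obtain ⟨x1, x2, x3, _⟩ := hov iv (List.mem_cons_of_mem _ hiv)
        have := hpw.1 iv hiv
        exact ⟨x1, x2, x3, by omega⟩
      have e1 := PySem.List.pyRange_one_append k (max k ab.1) (hi + 1) (le_max_left _ _) (by omega)
      have e2 := PySem.List.pyRange_one_append (max k ab.1) (ab.2 + 1) (hi + 1) (by omega) (by omega)
      have hf2 : (PySem.List.pyRange (max k ab.1) (ab.2 + 1)).filter
          (fun j => !decide (pvCov (ab :: t) j)) = [] := by
        rw [List.filter_eq_nil_iff]
        intro j hj
        rw [PySem.List.mem_pyRange_one] at hj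
        simp only [Bool.not_eq_true', decide_eq_false_iff_not, Decidable.not_not]
        exact ⟨ab, List.mem_cons_self, by omega, by omega⟩
      have hf3 : (PySem.List.pyRange (ab.2 + 1) (hi + 1)).filter
            (fun j => !decide (pvCov (ab :: t) j))
          = (PySem.List.pyRange (ab.2 + 1) (hi + 1)).filter (fun j => !decide (pvCov t j)) := by
        apply List.filter_congr
        intro j hj
        rw [PySem.List.mem_pyRange_one] at hj
        have hiff : pvCov (ab :: t) j ↔ pvCov t j := by
          constructor
          · rintro ⟨iv, hiv, hc1, hc2⟩
            rcases List.mem_cons.mp hiv with rfl | hiv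
            · omega
            · exact ⟨iv, hiv, hc1, hc2⟩
          · rintro ⟨iv, hiv, hc⟩
            exact ⟨iv, List.mem_cons_of_mem _ hiv, hc⟩
        simp [hiff]
      rw [hstep, ih (ab.2 + 1) _ (by omega) (by omega) hovt hpw.2, hout2,
          e1, e2, List.filter_append, List.filter_append,
          List.filter_eq_self.mpr hf1, hf2, hf3]
      simp [List.map_append, List.append_assoc]
    · -- interval sticks out past the window: nothing follows
      have ht : t = [] := by
        cases t with
        | nil => rfl
        | cons u t' =>
          exfalso
          have h1 := hpw.1 u List.mem_cons_self
          have h2 := (hov u (List.mem_cons_of_mem _ List.mem_cons_self)).2.2.1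
          omega
      subst ht
      have htail : pvEmitK rps [] (ab.2 + 1) hi
          (if k < ab.1 then out ++ PySem.List.slice rps (some k) (some ab.1) else out)
          = (if k < ab.1 then out ++ PySem.List.slice rps (some k) (some ab.1) else out) := by
        simp only [pvEmitK, List.foldl_nil]
        rw [if_neg (by omega)]
      have hcut := PySem.List.pyRange_one_append k (max k ab.1) (hi + 1) (le_max_left _ _) (by omega)
      have hf2 : (PySem.List.pyRange (max k ab.1) (hi + 1)).filter
          (fun j => !decide (pvCov [ab] j)) = [] := by
        rw [List.filter_eq_nil_iff]
        intro j hj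
        rw [PySem.List.mem_pyRange_one] at hj
        simp only [Bool.not_eq_true', decide_eq_false_iff_not, Decidable.not_not]
        exact ⟨ab, List.mem_cons_self, by omega, by omega⟩
      rw [hstep, htail, hout2, hcut, List.filter_append, List.filter_eq_self.mpr hf1, hf2]
      simp

-- once-present elements survive Set.add
theorem pv_mem_set_add {x y : Int} {s : PySem.Set Int} (h : x ∈ s) : x ∈ PySem.Set.add s y :=
  (PySem.Set.mem_add s y x).mpr (Or.inl h)

theorem pv_set_add_of_mem {x : Int} {s : PySem.Set Int} (h : x ∈ s) : PySem.Set.add s x = s := by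
  have hc : PySem.Set.contains s x = true := (PySem.Set.contains_iff s x).mpr h
  simp only [PySem.Set.add, hc, if_true]

-- adding values whose index is already covered is a no-op: the fold shrinks to the filtered range
theorem pv_foldl_add_covered (rps : List Int) (cov : List (Int × Int)) :
    ∀ (ks : List Int) (S : PySem.Set Int),
      (∀ j ∈ ks, pvCov cov j → PySem.List.pyGetD rps j 0 ∈ S) →
      ks.foldl (fun s j => PySem.Set.add s (PySem.List.pyGetD rps j 0)) S
        = (ks.filter (fun j => !decide (pvCov cov j))).foldl
            (fun s j => PySem.Set.add s (PySem.List.pyGetD rps j 0)) S := by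
  intro ks
  induction ks with
  | nil => intro S _; rfl
  | cons j t ih =>
    intro S h
    simp only [List.foldl_cons, List.filter_cons]
    by_cases hc : pvCov cov j
    · have hv := h j List.mem_cons_self hc
      simp only [hc, decide_true, Bool.not_true, Bool.false_eq_true, if_false]
      rw [pv_set_add_of_mem hv]
      exact ih S (fun j' hj' => h j' (List.mem_cons_of_mem _ hj'))
    · simp only [hc, decide_false, Bool.not_false, if_true, List.foldl_cons]
      exact ih _ (fun j' hj' hcj' => pv_mem_set_add (h j' (List.mem_cons_of_mem _ hj') hcj'))

-- every point of the merged interval lies in the window or in an old mid interval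
theorem pv_merged_cover (lo hi : Int) :
    ∀ (mid : List (Int × Int)), mid.Pairwise (fun p q => p.2 < q.1) →
      (∀ iv ∈ mid, lo ≤ iv.2 ∧ iv.1 ≤ hi ∧ iv.1 ≤ iv.2) →
      ∀ kk : Int, (match mid.head? with | none => lo | some ab => min lo ab.1) ≤ kk →
        kk ≤ (match mid.getLast? with | none => hi | some ab => max hi ab.2) →
        (lo ≤ kk ∧ kk ≤ hi) ∨ pvCov mid kk := by
  intro mid
  induction mid with
  | nil => intro _ _ kk h1 h2; simp only [List.head?_nil, List.getLast?_nil] at h1 h2; exact Or.inl ⟨h1, h2⟩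
  | cons ab t ih =>
    intro hpw hov kk h1 h2
    rw [List.pairwise_cons] at hpw
    obtain ⟨hab1, hab2, hab3⟩ := hov ab List.mem_cons_self
    simp only [List.head?_cons] at h1
    by_cases hk1 : kk < ab.1
    · -- below the first interval: inside the window
      exact Or.inl ⟨by omega, by omega⟩
    · by_cases hk2 : kk ≤ ab.2
      · exact Or.inr ⟨ab, List.mem_cons_self, by omega, hk2⟩
      · -- past the first interval
        cases t with
        | nil =>
          simp only [List.getLast?_singleton] at h2
          exact Or.inl ⟨by omega, by omega⟩
        | cons u t' =>
          have h2' : kk ≤ (match (u :: t').getLast? with | none => hi | some ab => max hi ab.2) := by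
            rw [List.getLast?_cons_cons] at h2
            exact h2
          have h1' : (match (u :: t').head? with | none => lo | some ab => min lo ab.1) ≤ kk := by
            simp only [List.head?_cons]
            exact le_trans (min_le_left _ _) (by omega)
          rcases ih hpw.2 (fun iv hiv => hov iv (List.mem_cons_of_mem _ hiv)) kk h1' h2' with h | h
          · exact Or.inl h
          · obtain ⟨iv, hiv, hc⟩ := h
            exact Or.inr ⟨iv, List.mem_cons_of_mem _ hiv, hc⟩

theorem pv_mem_of_head? {α : Type} {l : List α} {a : α} (h : l.head? = some a) : a ∈ l := by
  cases l with
  | nil => simp at h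
  | cons x t =>
    simp only [List.head?_cons, Option.some.injEq] at h
    subst h
    exact List.mem_cons_self

theorem pv_mem_of_getLast? {α : Type} {l : List α} {a : α} (h : l.getLast? = some a) : a ∈ l := by
  induction l with
  | nil => simp at h
  | cons x t ih =>
    cases t with
    | nil =>
      simp only [List.getLast?_singleton, Option.some.injEq] at h
      subst h
      exact List.mem_cons_self
    | cons u t' =>
      rw [List.getLast?_cons_cons] at h
      exact List.mem_cons_of_mem _ (ih h)

-- appending through the dedup: folding Set.add of the mapped values is one ofList append
theorem pv_foldl_addg (rps : List Int) (ks xs : List Int) :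
    ks.foldl (fun s j => PySem.Set.add s (PySem.List.pyGetD rps j 0)) (PySem.Set.ofList xs)
      = PySem.Set.ofList (xs ++ ks.map (fun j => PySem.List.pyGetD rps j 0)) := by
  have h1 : PySem.Set.ofList (xs ++ ks.map (fun j => PySem.List.pyGetD rps j 0))
      = (ks.map (fun j => PySem.List.pyGetD rps j 0)).foldl PySem.Set.add (PySem.Set.ofList xs) := by
    rw [PySem.Set.ofList_eq_foldl, PySem.Set.ofList_eq_foldl, List.foldl_append]
  rw [h1, List.foldl_map]

-- the coupled loop invariant: A's value set is the dedup of B's emitted list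
theorem pv_main (rps : List Int) (c : Int) :
    ∀ (ips : List Int) (out : List Int) (cov : List (Int × Int)),
      pvGood (rps.length : Int) cov →
      (∀ k : Int, pvCov cov k → PySem.List.pyGetD rps k 0 ∈ out) →
      ips.foldl (fun ex pos =>
        match (pvRealIndex rps).get? pos with
        | none => ex
        | some idx =>
          let lo := max 0 (idx - c)
          let hi := min (((rps.length : Int)) - 1) (idx + c)
          (PySem.List.pyRange lo (hi + 1)).foldl
            (fun ex k => PySem.Set.add ex (PySem.List.pyGetD rps k 0)) ex)
        (PySem.Set.ofList out)
      = PySem.Set.ofList ((ips.foldl (fun (s : List Int × List (Int × Int)) pos =>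
          match (pvRealIndex rps).get? pos with
          | none => s
          | some idx =>
            let lo := max 0 (idx - c)
            let hi := min (((rps.length : Int)) - 1) (idx + c)
            if lo > hi then s
            else
              let lmr := pvSplit s.2 lo hi
              let out := pvEmit rps lmr.2.1 lo hi s.1
              let new_lo := match lmr.2.1.head? with | none => lo | some ab => min lo ab.1
              let new_hi := match lmr.2.1.getLast? with | none => hi | some ab => max hi ab.2
              (out, lmr.1 ++ [(new_lo, new_hi)] ++ lmr.2.2)) (out, cov)).1) := by
  intro ips
  induction ips with
  | nil => intro out cov _ _; rfl
  | cons pos t ih =>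
    intro out cov hgood hlink
    simp only [List.foldl_cons]
    cases hri : (pvRealIndex rps).get? pos with
    | none =>
      dsimp only
      exact ih out cov hgood hlink
    | some idx =>
      dsimp only
      set lo := max 0 (idx - c) with hlo
      set hi := min (((rps.length : Int)) - 1) (idx + c) with hhi
      by_cases hlh : lo > hi
      · rw [if_pos hlh, PySem.List.pyRange_one_eq_nil (by omega)]
        simp only [List.foldl_nil]
        exact ih out cov hgood hlink
      · rw [if_neg hlh]
        have hlo0 : 0 ≤ lo := le_max_left 0 _
        have hlohi : lo ≤ hi := by omega
        have hhin : hi < (rps.length : Int) := by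
          have := min_le_left (((rps.length : Int)) - 1) (idx + c)
          omega
        simp only [pvSplit_eq]
        set covL := cov.filter (fun iv => decide (iv.2 < lo)) with hcovL
        set mid := cov.filter (fun iv => !decide (iv.2 < lo) && !decide (hi < iv.1)) with hmid
        set covR := cov.filter (fun iv => !decide (iv.2 < lo) && decide (hi < iv.1)) with hcovR
        set nl := (match mid.head? with | none => lo | some ab => min lo ab.1) with hnl
        set nh := (match mid.getLast? with | none => hi | some ab => max hi ab.2) with hnh
        -- membership facts for the three filter classes
        have hmemL : ∀ iv ∈ covL, iv ∈ cov ∧ iv.2 < lo := by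
          intro iv hiv
          rw [hcovL, List.mem_filter] at hiv
          exact ⟨hiv.1, by simpa using hiv.2⟩
        have hmemM : ∀ iv ∈ mid, iv ∈ cov ∧ lo ≤ iv.2 ∧ iv.1 ≤ hi := by
          intro iv hiv
          rw [hmid, List.mem_filter] at hiv
          obtain ⟨h1, h2⟩ := hiv
          simp only [Bool.and_eq_true, Bool.not_eq_true', decide_eq_false_iff_not] at h2
          exact ⟨h1, by omega, by omega⟩
        have hmemR : ∀ iv ∈ covR, iv ∈ cov ∧ lo ≤ iv.2 ∧ hi < iv.1 := by
          intro iv hiv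
          rw [hcovR, List.mem_filter] at hiv
          obtain ⟨h1, h2⟩ := hiv
          simp only [Bool.and_eq_true, Bool.not_eq_true', decide_eq_false_iff_not,
            decide_eq_true_eq] at h2
          exact ⟨h1, by omega, h2.2⟩
        have hsubM : mid.Sublist cov := by rw [hmid]; exact List.filter_sublist
        have hsubL : covL.Sublist cov := by rw [hcovL]; exact List.filter_sublist
        have hsubR : covR.Sublist cov := by rw [hcovR]; exact List.filter_sublist
        have hmid_pw : mid.Pairwise (fun p q => p.2 < q.1) := hgood.2.sublist hsubM
        have hcovL_pw : covL.Pairwise (fun p q => p.2 < q.1) := hgood.2.sublist hsubL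
        have hcovR_pw : covR.Pairwise (fun p q => p.2 < q.1) := hgood.2.sublist hsubR
        have hovmid : ∀ iv ∈ mid, 0 ≤ iv.1 ∧ iv.1 ≤ iv.2 ∧ iv.1 ≤ hi ∧ lo ≤ iv.2 + 1 := by
          intro iv hiv
          obtain ⟨hic, h2, h3⟩ := hmemM iv hiv
          obtain ⟨g1, g2, g3⟩ := hgood.1 iv hic
          exact ⟨g1, g2, h3, by omega⟩
        have hov' : ∀ iv ∈ mid, lo ≤ iv.2 ∧ iv.1 ≤ hi ∧ iv.1 ≤ iv.2 := by
          intro iv hiv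
          obtain ⟨hic, h2, h3⟩ := hmemM iv hiv
          exact ⟨h2, h3, (hgood.1 iv hic).2.1⟩
        -- bounds of the merged interval
        have hnl_lo : nl ≤ lo ∧ 0 ≤ nl := by
          rw [hnl]
          cases hh : mid.head? with
          | none => exact ⟨le_rfl, hlo0⟩
          | some ab =>
            have := (hgood.1 ab (hmemM ab (pv_mem_of_head? hh)).1).1
            exact ⟨min_le_left _ _, le_min hlo0 this⟩
        have hnh_hi : hi ≤ nh ∧ nh < (rps.length : Int) := by
          rw [hnh]
          cases hh : mid.getLast? with
          | none => exact ⟨le_rfl, hhin⟩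
          | some ab =>
            have := (hgood.1 ab (hmemM ab (pv_mem_of_getLast? hh)).1).2.2
            exact ⟨le_max_left _ _, max_lt hhin this⟩
        have hLnl : ∀ iv ∈ covL, iv.2 < nl := by
          intro iv hiv
          obtain ⟨hic, hil⟩ := hmemL iv hiv
          have hii := (hgood.1 iv hic).2.1
          rw [hnl]
          cases hh : mid.head? with
          | none => exact hil
          | some ab =>
            have habm := pv_mem_of_head? hh
            obtain ⟨habc, hab2, hab3⟩ := hmemM ab habm
            have hab4 := (hgood.1 ab habc).2.1
            rcases pv_pairwise_cases hgood.2 hic habc with heq | hr | hr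
            · exfalso; rw [heq] at hil; omega
            · exact lt_min hil hr
            · exfalso; omega
        have hnhR : ∀ jv ∈ covR, nh < jv.1 := by
          intro jv hjv
          obtain ⟨hjc, hj2, hj3⟩ := hmemR jv hjv
          rw [hnh]
          cases hh : mid.getLast? with
          | none => exact hj3
          | some ab =>
            have habm := pv_mem_of_getLast? hh
            obtain ⟨habc, hab2, hab3⟩ := hmemM ab habm
            have hjj := (hgood.1 jv hjc).2.1
            rcases pv_pairwise_cases hgood.2 habc hjc with heq | hr | hr
            · exfalso; rw [heq] at hab3; omega
            · exact max_lt hj3 hr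
            · exfalso; omega
        have hLR : ∀ iv ∈ covL, ∀ jv ∈ covR, iv.2 < jv.1 := by
          intro iv hiv jv hjv
          obtain ⟨hic, hil⟩ := hmemL iv hiv
          obtain ⟨hjc, hj2, hj3⟩ := hmemR jv hjv
          have hii := (hgood.1 iv hic).2.1
          have hjj := (hgood.1 jv hjc).2.1
          rcases pv_pairwise_cases hgood.2 hic hjc with heq | hr | hr
          · exfalso; rw [heq] at hil; omega
          · exact hr
          · exfalso; omega
        -- A's window fold equals the dedup-append of the uncovered values
        have hA : (PySem.List.pyRange lo (hi + 1)).foldl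
              (fun ex k => PySem.Set.add ex (PySem.List.pyGetD rps k 0)) (PySem.Set.ofList out)
            = PySem.Set.ofList (out ++
                ((PySem.List.pyRange lo (hi + 1)).filter (fun j => !decide (pvCov mid j))).map
                  (fun j => PySem.List.pyGetD rps j 0)) := by
          have hcovset : ∀ j ∈ PySem.List.pyRange lo (hi + 1), pvCov cov j →
              PySem.List.pyGetD rps j 0 ∈ PySem.Set.ofList out := by
            intro j _ hc
            simp only [PySem.Set.mem_ofList]
            exact hlink j hc
          have hpred : ∀ j ∈ PySem.List.pyRange lo (hi + 1),
              (!decide (pvCov cov j)) = (!decide (pvCov mid j)) := by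
            intro j hj
            rw [PySem.List.mem_pyRange_one] at hj
            have hiff : pvCov cov j ↔ pvCov mid j := by
              constructor
              · rintro ⟨iv, hiv, hc1, hc2⟩
                refine ⟨iv, ?_, hc1, hc2⟩
                rw [hmid, List.mem_filter]
                refine ⟨hiv, ?_⟩
                simp only [Bool.and_eq_true, Bool.not_eq_true', decide_eq_false_iff_not]
                constructor <;> omega
              · rintro ⟨iv, hiv, hc⟩
                exact ⟨iv, (hmemM iv hiv).1, hc⟩
            simp [hiff]
          rw [pv_foldl_add_covered rps cov _ _ hcovset, List.filter_congr hpred, pv_foldl_addg]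
        -- B's gap emission produces exactly those values
        have hB : pvEmit rps mid lo hi out
            = out ++ ((PySem.List.pyRange lo (hi + 1)).filter (fun j => !decide (pvCov mid j))).map
                (fun j => PySem.List.pyGetD rps j 0) :=
          (pvEmit_eq_pvEmitK rps mid lo hi out).trans
            (pvEmitK_eq rps hi hhin mid lo out hlo0 (by omega) hovmid hmid_pw)
        set newvals := ((PySem.List.pyRange lo (hi + 1)).filter
            (fun j => !decide (pvCov mid j))).map (fun j => PySem.List.pyGetD rps j 0) with hnew
        -- the new cov is good again
        have hgood' : pvGood (rps.length : Int) (covL ++ [(nl, nh)] ++ covR) := by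
          constructor
          · intro iv hiv
            rcases List.mem_append.mp hiv with hiv | hiv
            · rcases List.mem_append.mp hiv with hiv | hiv
              · exact hgood.1 iv (hmemL iv hiv).1
              · have : iv = (nl, nh) := by simpa using hiv
                subst this
                exact ⟨hnl_lo.2, by simp only []; omega, hnh_hi.2⟩
            · exact hgood.1 iv (hmemR iv hiv).1
          · rw [List.append_assoc, List.singleton_append, List.pairwise_append]
            refine ⟨hcovL_pw, ?_, ?_⟩
            · rw [List.pairwise_cons]
              exact ⟨hnhR, hcovR_pw⟩
            · intro iv hiv jv hjv
              rcases List.mem_cons.mp hjv with rfl | hjv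
              · exact hLnl iv hiv
              · exact hLR iv hiv jv hjv
        -- and the emitted list still dominates it
        have hlink' : ∀ k : Int, pvCov (covL ++ [(nl, nh)] ++ covR) k →
            PySem.List.pyGetD rps k 0 ∈ out ++ newvals := by
          rintro kk ⟨iv, hiv, hc1, hc2⟩
          rcases List.mem_append.mp hiv with hiv | hiv
          · rcases List.mem_append.mp hiv with hiv | hiv
            · exact List.mem_append_left _ (hlink kk ⟨iv, (hmemL iv hiv).1, hc1, hc2⟩)
            · have : iv = (nl, nh) := by simpa using hiv
              subst this
              have hcase := pv_merged_cover lo hi mid hmid_pw hov' kk (hnl ▸ hc1) (hnh ▸ hc2)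
              rcases hcase with ⟨hw1, hw2⟩ | hcm
              · by_cases hcc : pvCov cov kk
                · exact List.mem_append_left _ (hlink kk hcc)
                · refine List.mem_append_right _ ?_
                  rw [hnew]
                  refine List.mem_map.mpr ⟨kk, ?_, rfl⟩
                  rw [List.mem_filter]
                  refine ⟨PySem.List.mem_pyRange_one.mpr ⟨hw1, by omega⟩, ?_⟩
                  simp only [Bool.not_eq_true', decide_eq_false_iff_not]
                  rintro ⟨jv, hjv, hj1, hj2⟩
                  exact hcc ⟨jv, (hmemM jv hjv).1, hj1, hj2⟩
              · rcases hcm with ⟨jv, hjv, hj1, hj2⟩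
                exact List.mem_append_left _ (hlink kk ⟨jv, (hmemM jv hjv).1, hj1, hj2⟩)
          · exact List.mem_append_left _ (hlink kk ⟨iv, (hmemR iv hiv).1, hc1, hc2⟩)
        rw [hA, hB]
        have hrec := ih (out ++ newvals) (covL ++ [(nl, nh)] ++ covR) hgood' hlink'
        simpa only [pvSplit_eq] using hrec

-- ===== VERDICT (by name: the statement is the Claim_ definition above) =====
theorem expand_with_context_spec : Claim_equal_expand_with_context := by
  intro ips rps c _
  unfold Spec_expand_with_context expand_with_context expand_with_context_alt
  by_cases h : ips = []
  · rw [if_pos h, if_pos h]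
  · rw [if_neg h, if_neg h]
    have hgood0 : pvGood (rps.length : Int) [] := ⟨by intro iv hiv; simp at hiv, List.Pairwise.nil⟩
    have hlink0 : ∀ k : Int, pvCov ([] : List (Int × Int)) k → PySem.List.pyGetD rps k 0 ∈ ([] : List Int) := by
      rintro k ⟨iv, hiv, _⟩
      simp at hiv
    have hmain := pv_main rps c ips [] [] hgood0 hlink0
    exact congrArg (fun E => (E, PySem.Set.inter (PySem.Set.ofList ips) E)) hmain
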